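-- pv_equiv track=rewrite | github.com/DooDuZ/sparta_python | daily/boj1449.py | solution
-- ===== SOURCE A (Python) =====
-- def solution(params):
--     n, m, points = params
--
--     maximum = max(points)
--
--     visited = [False for _ in range(maximum+1)]
--
--     cnt = 0
--
--     for i in range(1,maximum+1):
--         if i in points and not visited[i]:
--
--             for j in range(i, min(i+m, maximum+1)):
--
--                 visited[j] = True
--             cnt += 1
--
--     return cnt
-- ===== SOURCE B (Python) =====
-- def solution(params):
--     n, m, points = params
--     cover = 0
--     cnt = 0
--     for p in sorted(set(points)):
--         if p > cover:
--             cnt += 1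
--             cover = p + m - 1
--     return cnt
-- ===== Notes on version B (the rewrite author's own statement) =====
-- stated objective: faster
-- what changed: Replaced the O(max)-sized visited array and the scan over every integer 1..max(points) (with an O(n) membership test per integer) by the standard greedy: sort the distinct points once and place a tape at each point not covered by the previous tape.
import Mathlib
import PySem

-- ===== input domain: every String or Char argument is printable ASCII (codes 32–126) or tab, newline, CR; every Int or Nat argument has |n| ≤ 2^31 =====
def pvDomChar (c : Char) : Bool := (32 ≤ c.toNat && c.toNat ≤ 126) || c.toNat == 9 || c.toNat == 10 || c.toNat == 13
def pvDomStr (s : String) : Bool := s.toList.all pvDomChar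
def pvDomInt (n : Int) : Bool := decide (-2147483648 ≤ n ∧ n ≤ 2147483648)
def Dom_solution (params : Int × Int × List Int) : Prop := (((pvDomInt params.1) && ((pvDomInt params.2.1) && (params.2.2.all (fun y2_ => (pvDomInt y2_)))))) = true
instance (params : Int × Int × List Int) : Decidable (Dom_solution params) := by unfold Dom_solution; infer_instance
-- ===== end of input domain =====

-- B replaces A's scan over every integer 1..max(points) with a visited array by a
-- sort-the-distinct-points greedy (objective: faster).

-- ===== PORT A =====
-- literal port of A: max(points) raises on empty (excluded by Pre_); visited is a Bool
-- list of size max+1; both indexings are always in range, so pyGetD false / set are exact.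
def solution (params : Int × Int × List Int) : Int :=
  let m := params.2.1
  let points := params.2.2
  let maximum := (PySem.List.max? points (fun x => x)).getD 0
  let visited : List Bool := (PySem.List.pyRange 0 (maximum + 1) 1).map (fun _ => false)
  let r := (PySem.List.pyRange 1 (maximum + 1) 1).foldl
    (fun (st : List Bool × Int) i =>
      if points.contains i && !(PySem.List.pyGetD st.1 i false) then
        ((PySem.List.pyRange i (min (i + m) (maximum + 1)) 1).foldl
          (fun v j => v.set j.toNat true) st.1, st.2 + 1)
      else st)
    (visited, 0)
  r.2

-- ===== PORT B =====
-- literal port of Source B: fold over sorted(set(points)) with state (cover, cnt)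
def solution_alt (params : Int × Int × List Int) : Int :=
  let m := params.2.1
  let points := params.2.2
  ((PySem.List.sorted (PySem.Set.ofList points) (fun x => x) false).foldl
    (fun (st : Int × Int) p => if st.1 < p then (p + m - 1, st.2 + 1) else st)
    (0, 0)).2

-- ===== PRECONDITION & SPEC =====
-- Pre_ excludes only the empty points list, on which A's max(points) raises ValueError.
def Pre_solution (params : Int × Int × List Int) : Prop := params.2.2 ≠ []
instance (params : Int × Int × List Int) : Decidable (Pre_solution params) := by unfold Pre_solution; infer_instance
def pvWitness_solution : (Int × Int × List Int) := (3, 2, [1, 3, 6])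

def Spec_solution (params : Int × Int × List Int) (out : Int) : Prop := out = solution_alt params
instance (params : Int × Int × List Int) (out : Int) : Decidable (Spec_solution params out) := by unfold Spec_solution; infer_instance

-- ===== CLAIM (what is proved, stated in full; the proofs are below) =====
def Claim_equal_solution : Prop := ∀ (params : Int × Int × List Int), Dom_solution params → Pre_solution params → Spec_solution params (solution params)

-- ===== LEMMAS AND PROOFS =====

-- the greedy step shared by the abstract reading of both loops
def pvStep (m : Int) (st : Int × Int) (p : Int) : Int × Int :=
  if st.1 < p then (p + m - 1, st.2 + 1) else st

-- the inner marking loop preserves the length of visited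
lemma pv_inner_length (l : List Int) (v : List Bool) :
    (l.foldl (fun v j => v.set j.toNat true) v).length = v.length := by
  induction l generalizing v with
  | nil => rfl
  | cons a t ih => simpa using ih (v.set a.toNat true)

-- what the inner marking loop does to each cell
lemma pv_inner_get (k : Nat) : ∀ (i e : Int) (v : List Bool), (e - i).toNat = k → 0 ≤ i →
    e ≤ (v.length : Int) → ∀ j : Int, 0 ≤ j →
    PySem.List.pyGetD ((PySem.List.pyRange i e 1).foldl (fun v j => v.set j.toNat true) v) j false
      = if i ≤ j ∧ j < e then true else PySem.List.pyGetD v j false := by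
  induction k with
  | zero =>
      intro i e v hk _ _ j _
      have he : e ≤ i := by omega
      rw [PySem.List.pyRange_one_eq_nil he]
      have : ¬ (i ≤ j ∧ j < e) := by omega
      simp [this]
  | succ k ih =>
      intro i e v hk hi hlen j hj
      have hie : i < e := by omega
      rw [PySem.List.pyRange_one_cons hie]
      simp only [List.foldl_cons]
      rw [ih (i+1) e (v.set i.toNat true) (by omega) (by omega) (by simpa using hlen) j hj]
      rw [PySem.List.pyGetD_of_nonneg _ _ hj, PySem.List.pyGetD_of_nonneg _ _ hj]
      by_cases h1 : (i+1) ≤ j ∧ j < e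
      · simp [h1]; omega
      · simp only [if_neg h1]
        by_cases h2 : i ≤ j ∧ j < e
        · -- j = i: the cell just set
          have hji : j = i := by omega
          subst hji
          have hlt : j.toNat < v.length := by omega
          simp [h2, List.getD, hlt]
        · have hne : j.toNat ≠ i.toNat := by omega
          simp only [List.getD, List.getElem?_set_ne (hne.symm), if_neg h2]

-- A's main loop ≡ fold of pvStep guarded by membership, over the same range
lemma pv_mainA (m M : Int) (points : List Int) :
    ∀ (k : Nat) (a : Int) (v : List Bool) (cover c : Int),
    a = M + 1 - k → 1 ≤ a → (v.length : Int) = M + 1 →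
    (∀ j : Int, a ≤ j → j ≤ M → PySem.List.pyGetD v j false = decide (j ≤ cover)) →
    ((PySem.List.pyRange a (M + 1) 1).foldl
      (fun (st : List Bool × Int) i =>
        if points.contains i && !(PySem.List.pyGetD st.1 i false) then
          ((PySem.List.pyRange i (min (i + m) (M + 1)) 1).foldl
            (fun v j => v.set j.toNat true) st.1, st.2 + 1)
        else st) (v, c)).2
    = ((PySem.List.pyRange a (M + 1) 1).foldl
        (fun st i => if points.contains i then pvStep m st i else st) (cover, c)).2 := by
  intro k
  induction k with
  | zero =>
      intro a v cover c hk _ _ _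
      rw [PySem.List.pyRange_one_eq_nil (by omega)]
      rfl
  | succ k ih =>
      intro a v cover c hk ha hlen hinv
      have haM : a < M + 1 := by omega
      rw [PySem.List.pyRange_one_cons haM]
      simp only [List.foldl_cons]
      have hva : PySem.List.pyGetD v a false = decide (a ≤ cover) := hinv a le_rfl (by omega)
      by_cases hc : points.contains a = true
      · by_cases hcov : cover < a
        · -- tape placed
          have hvaf : PySem.List.pyGetD v a false = false := by
            rw [hva]; simp; omega
          have hcond : (points.contains a && !(PySem.List.pyGetD v a false)) = true := by
            rw [hc, hvaf]; rfl
          rw [if_pos hcond]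
          have hstep : pvStep m (cover, c) a = (a + m - 1, c + 1) := by
            simp [pvStep, hcov]
          rw [if_pos hc, hstep]
          set e := min (a + m) (M + 1) with he
          set v' := (PySem.List.pyRange a e 1).foldl (fun v j => v.set j.toNat true) v with hv'
          have hlen' : (v'.length : Int) = M + 1 := by
            rw [hv', pv_inner_length]; exact hlen
          refine ih (a+1) v' (a + m - 1) (c+1) (by omega) (by omega) hlen' ?_
          intro j hj hjM
          rw [hv', pv_inner_get (e - a).toNat a e v rfl (by omega) (by omega) j (by omega)]
          by_cases hje : a ≤ j ∧ j < e
          · have : j ≤ a + m - 1 := by omega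
            simp [hje, this]
          · have h1 : ¬ (j ≤ a + m - 1) := by omega
            have h2 : ¬ (j ≤ cover) := by omega
            rw [if_neg hje, hinv j (by omega) hjM]
            simp [h1, h2]
        · -- already covered: neither loop does anything
          have hvat : PySem.List.pyGetD v a false = true := by
            rw [hva]; simp; omega
          have hcond : (points.contains a && !(PySem.List.pyGetD v a false)) = false := by
            rw [hc, hvat]; rfl
          have hstep : pvStep m (cover, c) a = (cover, c) := by
            simp [pvStep, hcov]
          rw [hcond, if_pos hc, hstep]
          simp only [Bool.false_eq_true, if_false]
          exact ih (a+1) v cover c (by omega) (by omega) hlen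
            (fun j hj hjM => hinv j (by omega) hjM)
      · -- not a leak point
        have hc' : points.contains a = false := by simpa using hc
        have hcond : (points.contains a && !(PySem.List.pyGetD v a false)) = false := by
          simp only [hc', Bool.false_and]
        rw [hcond]
        simp only [Bool.false_eq_true, if_false, if_neg hc]
        exact ih (a+1) v cover c (by omega) (by omega) hlen
          (fun j hj hjM => hinv j (by omega) hjM)

-- a fold whose guard skips non-members is a fold over the filtered list
lemma pv_fold_filter {α β : Type} (f : β → α → β) (q : α → Bool) :
    ∀ (l : List α) (st : β),
    l.foldl (fun st i => if q i then f st i else st) st = (l.filter q).foldl f st := by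
  intro l
  induction l with
  | nil => intro st; rfl
  | cons a t ih =>
      intro st
      by_cases h : q a = true <;> simp [h, ih]

-- skipping the non-positive prefix of a strictly increasing list is harmless from cover = 0
lemma pv_fold_pos (m : Int) : ∀ (l : List Int), l.Pairwise (· < ·) → ∀ c : Int,
    l.foldl (pvStep m) (0, c) = (l.filter (fun p => decide (0 < p))).foldl (pvStep m) (0, c) := by
  intro l
  induction l with
  | nil => intro _ _; rfl
  | cons a t ih =>
      intro hp c
      rcases List.pairwise_cons.mp hp with ⟨ha, ht⟩
      by_cases h : 0 < a
      · have : t.filter (fun p => decide (0 < p)) = t :=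
          List.filter_eq_self.mpr (fun x hx => by simpa using lt_trans h (ha x hx))
        simp [h, List.foldl_cons, this]
      · have hs : pvStep m (0, c) a = (0, c) := by
          simp [pvStep]; omega
        simp [h, List.foldl_cons, hs, ih ht c]

-- two strictly increasing integer lists with the same members are equal
lemma pv_sorted_ext (l₁ l₂ : List Int) (h₁ : l₁.Pairwise (· < ·)) (h₂ : l₂.Pairwise (· < ·))
    (hm : ∀ x, x ∈ l₁ ↔ x ∈ l₂) : l₁ = l₂ := by
  have n₁ : l₁.Nodup := h₁.imp (fun h => ne_of_lt h)
  have n₂ : l₂.Nodup := h₂.imp (fun h => ne_of_lt h)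
  exact List.Perm.eq_of_pairwise (fun a b _ _ h h' => absurd h' (lt_asymm h)) h₁ h₂
    ((List.perm_ext_iff_of_nodup n₁ n₂).mpr hm)

-- the fresh visited array reads false everywhere
lemma pv_getD_map_false (l : List Int) (n : Nat) :
    (l.map (fun _ => false)).getD n false = false := by
  induction l generalizing n with
  | nil => rfl
  | cons a t ih => cases n with
    | zero => rfl
    | succ n => exact ih n

-- the assembled equivalence
lemma pv_final (params : Int × Int × List Int) (hpre : params.2.2 ≠ []) :
    solution params = solution_alt params := by
  obtain ⟨M, hM⟩ : ∃ M, PySem.List.max? params.2.2 (fun x => x) = some M := by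
    cases h : PySem.List.max? params.2.2 (fun x => x) with
    | none => exact absurd ((PySem.List.max?_eq_none_iff _ _).mp h) hpre
    | some M => exact ⟨M, rfl⟩
  have hmax : ∀ y ∈ params.2.2, y ≤ M := fun y hy => PySem.List.max?_isMax hM y hy
  have hMd : (PySem.List.max? params.2.2 (fun x => x)).getD 0 = M := by rw [hM]; rfl
  -- the two filtered lists coincide
  have hfil : (PySem.List.pyRange 1 (M + 1) 1).filter (fun i => params.2.2.contains i)
      = (PySem.List.sorted (PySem.Set.ofList params.2.2) (fun x => x) false).filter
          (fun p => decide (0 < p)) := by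
    apply pv_sorted_ext
    · exact (PySem.List.pairwise_lt_pyRange_one 1 (M + 1)).filter _
    · exact (PySem.List.sorted_ofList_pairwise_lt params.2.2).filter _
    · intro x
      simp only [List.mem_filter, PySem.List.mem_pyRange_one, PySem.List.mem_sorted,
        PySem.Set.mem_ofList, List.contains_iff_mem, decide_eq_true_eq]
      constructor
      · rintro ⟨⟨h1, _⟩, hc⟩; exact ⟨hc, by omega⟩
      · rintro ⟨hmem, hpos⟩
        have := hmax x hmem
        exact ⟨⟨by omega, by omega⟩, hmem⟩
  -- B is the fold of pvStep over the positive distinct points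
  have hB : solution_alt params
      = (((PySem.List.sorted (PySem.Set.ofList params.2.2) (fun x => x) false).filter
            (fun p => decide (0 < p))).foldl (pvStep params.2.1) (0, 0)).2 := by
    show ((PySem.List.sorted (PySem.Set.ofList params.2.2) (fun x => x) false).foldl
        (pvStep params.2.1) (0, 0)).2 = _
    rw [pv_fold_pos params.2.1 _ (PySem.List.sorted_ofList_pairwise_lt params.2.2) 0]
  -- A is the same fold over the leak points in [1, M]
  have hA : solution params
      = (((PySem.List.pyRange 1 (M + 1) 1).filter (fun i => params.2.2.contains i)).foldl
          (pvStep params.2.1) (0, 0)).2 := by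
    show ((PySem.List.pyRange 1 ((PySem.List.max? params.2.2 (fun x => x)).getD 0 + 1) 1).foldl
        (fun (st : List Bool × Int) i =>
          if params.2.2.contains i && !(PySem.List.pyGetD st.1 i false) then
            ((PySem.List.pyRange i (min (i + params.2.1)
                ((PySem.List.max? params.2.2 (fun x => x)).getD 0 + 1)) 1).foldl
              (fun v j => v.set j.toNat true) st.1, st.2 + 1)
          else st)
        ((PySem.List.pyRange 0 ((PySem.List.max? params.2.2 (fun x => x)).getD 0 + 1) 1).map
          (fun _ => false), 0)).2 = _
    rw [hMd, ← pv_fold_filter (pvStep params.2.1) (fun i => params.2.2.contains i)]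
    by_cases hM0 : 0 ≤ M
    · refine pv_mainA params.2.1 M params.2.2 M.toNat 1 _ 0 0 (by omega) le_rfl ?_ ?_
      · simp [PySem.List.length_pyRange_one]; omega
      · intro j hj hjM
        rw [PySem.List.pyGetD_of_nonneg _ _ (by omega), pv_getD_map_false]
        simp; omega
    · rw [PySem.List.pyRange_one_eq_nil (by omega : M + 1 ≤ 1)]
      rfl
  rw [hA, hfil, ← hB]

-- ===== VERDICT (by name: the statement is the Claim_ definition above) =====
theorem solution_spec : Claim_equal_solution := by
  intro params _ hpre
  exact pv_final params hpre
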